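-- pv_equiv track=rewrite | github.com/animeshokhade/dsa | scaler/Amazing Subarrays.py | solve
-- ===== SOURCE A (Python) =====
-- def solve(A, B):
--     if B == 0:
--         ans = [index for index, a in enumerate(A)]
--         return ans
--
--     n = len(A)
--     countLeft, countRight = [0] * n, [0] * n
--
--     tempCount = 0
--
--     for i in range(1, n):
--         if A[i] != A[i - 1]:
--             tempCount += 1
--             countLeft[i] = tempCount
--         else:
--             countLeft[i] = 0
--             tempCount = 0
--
--     tempCount = 0
--
--     for j in range(n - 2, -1, -1):
--         if A[j] != A[j + 1]:
--             tempCount += 1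
--             countRight[j] = tempCount
--         else:
--             countRight[j] = 0
--             tempCount = 0
--
--     ans = []
--
--     for index, ele in enumerate(A):
--         if countLeft[index] >= B and countRight[index] >= B:
--             ans.append(index)
--
--     return ans
-- ===== SOURCE B (Python) =====
-- def solve(A, B):
--     n = len(A)
--     if B <= 0:
--         return list(range(n))
--     ans = []
--     l = 0  # start of the current maximal distinct-neighbour run
--     for i in range(1, n):
--         if A[i] == A[i - 1]:
--             ans.extend(range(l + B, i - B))  # run [l, i-1]: indices l+B .. i-1-B qualify
--             l = i
--     ans.extend(range(l + B, n - B))  # last run [l, n-1]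
--     return ans
-- ===== Notes on version B (the rewrite author's own statement) =====
-- stated objective: faster
-- what changed: Replaces the three passes with countLeft/countRight arrays by a single scan that tracks only the current run start and emits each run's qualifying indices as one contiguous range.
import Mathlib
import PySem

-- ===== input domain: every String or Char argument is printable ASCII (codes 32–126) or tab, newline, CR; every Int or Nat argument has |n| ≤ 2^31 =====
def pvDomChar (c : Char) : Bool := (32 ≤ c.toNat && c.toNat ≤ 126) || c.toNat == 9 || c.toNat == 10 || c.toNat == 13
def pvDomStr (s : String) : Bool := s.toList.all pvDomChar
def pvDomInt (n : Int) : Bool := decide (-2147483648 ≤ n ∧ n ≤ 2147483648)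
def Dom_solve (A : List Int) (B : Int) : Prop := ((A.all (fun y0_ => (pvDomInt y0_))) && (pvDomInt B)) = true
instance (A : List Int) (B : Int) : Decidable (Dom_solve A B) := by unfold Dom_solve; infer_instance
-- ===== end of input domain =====

-- B replaces A's three passes and two count arrays by a single scan over run boundaries that
-- emits each maximal distinct-neighbour run's qualifying indices as one contiguous range.

-- ===== PORT A =====
def solve (A : List Int) (B : Int) : List Int :=
  if B == 0 then (PySem.List.enumerate A).map (fun p => p.1)
  else
    let n : Int := PySem.List.len A
    let countLeft : List Int := List.replicate A.length 0
    let countRight : List Int := List.replicate A.length 0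
    -- for i in range(1, n): build countLeft with running tempCount
    let s1 := (PySem.List.pyRange 1 n).foldl (fun (st : List Int × Int) i =>
        if PySem.List.pyGetD A i 0 ≠ PySem.List.pyGetD A (i - 1) 0 then
          (PySem.List.pySetD st.1 i (st.2 + 1), st.2 + 1)
        else
          (PySem.List.pySetD st.1 i 0, 0)) (countLeft, 0)
    -- for j in range(n-2, -1, -1): build countRight with running tempCount
    let s2 := (PySem.List.pyRange (n - 2) (-1) (-1)).foldl (fun (st : List Int × Int) j =>
        if PySem.List.pyGetD A j 0 ≠ PySem.List.pyGetD A (j + 1) 0 then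
          (PySem.List.pySetD st.1 j (st.2 + 1), st.2 + 1)
        else
          (PySem.List.pySetD st.1 j 0, 0)) (countRight, 0)
    (PySem.List.enumerate A).foldl (fun acc p =>
        if B ≤ PySem.List.pyGetD s1.1 p.1 0 ∧ B ≤ PySem.List.pyGetD s2.1 p.1 0 then
          acc ++ [p.1]
        else acc) []

-- ===== PORT B =====
def solve_alt (A : List Int) (B : Int) : List Int :=
  let n : Int := PySem.List.len A
  if B ≤ 0 then PySem.List.pyRange 0 n
  else
    -- single scan; state = (ans, l) where l is the current run's start index
    let st := (PySem.List.pyRange 1 n).foldl (fun (st : List Int × Int) i =>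
        if PySem.List.pyGetD A i 0 == PySem.List.pyGetD A (i - 1) 0 then
          (st.1 ++ PySem.List.pyRange (st.2 + B) (i - B), i)
        else st) ([], 0)
    st.1 ++ PySem.List.pyRange (st.2 + B) (n - B)

-- ===== PRECONDITION & SPEC =====
def Spec_solve (A : List Int) (B : Int) (out : List Int) : Prop := out = solve_alt A B
instance (A : List Int) (B : Int) (out : List Int) : Decidable (Spec_solve A B out) := by unfold Spec_solve; infer_instance

-- ===== CLAIM (what is proved, stated in full; the proofs are below) =====
def Claim_equal_solve : Prop := ∀ (A : List Int) (B : Int), Dom_solve A B → Spec_solve A B (solve A B)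

-- ===== LEMMAS AND PROOFS =====

-- countLeft[k] of A, as a recurrence: length of the distinct-neighbour chain ending at k
def clA (A : List Int) : Nat → Int
  | 0 => 0
  | k + 1 => if A.getD (k + 1) 0 ≠ A.getD k 0 then clA A k + 1 else 0

-- countRight[k] of A: length of the distinct-neighbour chain starting at k
def crA (A : List Int) (k : Nat) : Int :=
  if _h : k + 1 < A.length then
    if A.getD k 0 ≠ A.getD (k + 1) 0 then crA A (k + 1) + 1 else 0
  else 0
termination_by A.length - k

-- the common filter predicate: index i qualifies
def pvP (A : List Int) (B : Int) (i : Int) : Bool :=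
  decide (B ≤ clA A i.toNat ∧ B ≤ crA A i.toNat)

theorem clA_nonneg (A : List Int) (k : Nat) : 0 ≤ clA A k := by
  induction k with
  | zero => simp [clA]
  | succ k ih => unfold clA; split <;> omega

theorem crA_nonneg (A : List Int) (k : Nat) : 0 ≤ crA A k := by
  unfold crA
  split
  · split
    · have := crA_nonneg A (k + 1); omega
    · omega
  · omega
termination_by A.length - k

theorem clA_le (A : List Int) (k : Nat) : clA A k ≤ (k : Int) := by
  induction k with
  | zero => simp [clA]
  | succ k ih => unfold clA; split <;> [push_cast; push_cast] <;> omega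

theorem clA_succ_pos (A : List Int) (k : Nat) (h : 1 ≤ clA A (k + 1)) :
    clA A (k + 1) = clA A k + 1 ∧ A.getD (k + 1) 0 ≠ A.getD k 0 := by
  by_cases hne : A.getD (k + 1) 0 ≠ A.getD k 0
  · refine ⟨?_, hne⟩
    simp only [clA]; rw [if_pos hne]
  · exfalso
    simp only [clA] at h; rw [if_neg hne] at h; omega

-- walking back d steps inside a run
theorem clA_back (A : List Int) (k d : Nat) (h : (d : Int) ≤ clA A k) :
    clA A (k - d) = clA A k - d := by
  induction d generalizing k with
  | zero => simp
  | succ d ih =>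
    have hk : 1 ≤ clA A k := by push_cast at h; omega
    have hkpos : k ≠ 0 := by
      intro hk0; subst hk0; simp [clA] at hk
    obtain ⟨k', rfl⟩ : ∃ k', k = k' + 1 := ⟨k - 1, by omega⟩
    obtain ⟨hstep, _⟩ := clA_succ_pos A k' hk
    have h' : (d : Int) ≤ clA A k' := by push_cast at h ⊢; omega
    have := ih k' h'
    have hsub : k' + 1 - (d + 1) = k' - d := by omega
    rw [hsub, this]
    push_cast; omega

-- walking forward along a distinct-neighbour chain
theorem crA_chain (A : List Int) (k m : Nat) (hk : k ≤ m) (hm : m < A.length)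
    (hne : ∀ j, k ≤ j → j < m → A.getD j 0 ≠ A.getD (j + 1) 0) :
    crA A k = crA A m + ((m : Int) - k) := by
  obtain ⟨d, rfl⟩ : ∃ d, m = k + d := ⟨m - k, by omega⟩
  clear hk
  induction d generalizing k with
  | zero => norm_num
  | succ d ih =>
    have h1 : k + 1 < A.length := by omega
    have h2 : A.getD k 0 ≠ A.getD (k + 1) 0 := hne k le_rfl (by omega)
    have hstep : crA A k = crA A (k + 1) + 1 := by
      rw [crA, dif_pos h1, if_pos h2]
    have heq : k + (d + 1) = k + 1 + d := by omega
    have := ih (k + 1) (by omega) (fun j hj1 hj2 => hne j (by omega) (by omega))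
    rw [hstep, this, heq]; push_cast; omega

-- crA at a run end is 0
theorem crA_end (A : List Int) (k : Nat)
    (h : ¬ (k + 1 < A.length) ∨ A.getD k 0 = A.getD (k + 1) 0) : crA A k = 0 := by
  rw [crA]
  rcases h with h | h
  · rw [dif_neg h]
  · by_cases h2 : k + 1 < A.length
    · rw [dif_pos h2, if_neg (not_not_intro h)]
    · rw [dif_neg h2]

-- ===== array update/initialization helpers =====

theorem map_range_eq_replicate (len : Nat) (g : Nat → Int) (h : ∀ k, k < len → g k = 0) :
    (List.range len).map g = List.replicate len 0 := by
  apply List.ext_getElem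
  · simp
  · intro k hk1 hk2
    simp only [List.getElem_map, List.getElem_range, List.getElem_replicate]
    exact h k (by simpa using hk1)

theorem set_map_lt (len m : Nat) (f : Nat → Int) (_hm : m < len) :
    ((List.range len).map (fun k => if k < m then f k else 0)).set m (f m)
      = (List.range len).map (fun k => if k < m + 1 then f k else 0) := by
  apply List.ext_getElem
  · simp
  · intro k hk1 hk2
    simp only [List.getElem_set, List.getElem_map, List.getElem_range]
    split_ifs <;> simp_all <;> omega

theorem set_map_ge (len t : Nat) (f : Nat → Int) (_ht : t < len) :
    ((List.range len).map (fun k => if t + 1 ≤ k then f k else 0)).set t (f t)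
      = (List.range len).map (fun k => if t ≤ k then f k else 0) := by
  apply List.ext_getElem
  · simp
  · intro k hk1 hk2
    simp only [List.getElem_set, List.getElem_map, List.getElem_range]
    split_ifs <;> simp_all <;> omega

-- ===== A-side: the two array-building loops =====

theorem A_left_loop (A : List Int) (m : Nat) (h1 : 1 ≤ m) (hm : m ≤ A.length) :
    (PySem.List.pyRange 1 (m : Int)).foldl (fun (st : List Int × Int) i =>
        if PySem.List.pyGetD A i 0 ≠ PySem.List.pyGetD A (i - 1) 0 then
          (PySem.List.pySetD st.1 i (st.2 + 1), st.2 + 1)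
        else
          (PySem.List.pySetD st.1 i 0, 0)) (List.replicate A.length 0, 0)
    = ((List.range A.length).map (fun k => if k < m then clA A k else 0), clA A (m - 1)) := by
  induction m, h1 using Nat.le_induction with
  | base =>
    rw [show ((1 : Nat) : Int) = 1 by norm_num, PySem.List.pyRange_one_eq_nil le_rfl]
    simp only [List.foldl_nil]
    rw [map_range_eq_replicate A.length _ (fun k hk => by
      split
      · next h => interval_cases k; simp [clA]
      · rfl)]
    simp [clA]
  | succ m hm1 ih =>
    have hmlen : m ≤ A.length := by omega
    have hcast : ((m + 1 : Nat) : Int) = (m : Int) + 1 := by push_cast; ring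
    rw [hcast, PySem.List.pyRange_one_succ_right (by exact_mod_cast hm1), List.foldl_append,
      ih hmlen]
    simp only [List.foldl_cons, List.foldl_nil]
    have hgetm : PySem.List.pyGetD A ((m : Int)) 0 = A.getD m 0 := PySem.List.pyGetD_natCast A m 0
    have hgetm1 : PySem.List.pyGetD A ((m : Int) - 1) 0 = A.getD (m - 1) 0 := by
      rw [show ((m : Int) - 1) = ((m - 1 : Nat) : Int) by omega, PySem.List.pyGetD_natCast]
    have hmm : m - 1 + 1 = m := by omega
    have hclm : clA A m = if A.getD m 0 ≠ A.getD (m - 1) 0 then clA A (m - 1) + 1 else 0 := by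
      conv_lhs => rw [← hmm]
      simp only [clA]
      rw [hmm]
    by_cases hne : A.getD m 0 ≠ A.getD (m - 1) 0
    · rw [if_pos (by rw [hgetm, hgetm1]; exact hne)]

      rw [show clA A (m - 1) + 1 = clA A m by rw [hclm, if_pos hne],
        show ((m : Int)) = ((m : Nat) : Int) by norm_num, PySem.List.pySetD_natCast,
        set_map_lt A.length m (clA A) (by omega)]
      norm_num
    · rw [if_neg (by rw [hgetm, hgetm1]; exact hne)]

      have hclm0 : clA A m = 0 := by rw [hclm, if_neg hne]
      have hset := set_map_lt A.length m (clA A) (by omega)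
      rw [hclm0] at hset
      rw [show ((m : Int)) = ((m : Nat) : Int) by norm_num, PySem.List.pySetD_natCast, hset]
      simp [hclm0]

theorem A_right_loop (A : List Int) (t : Nat) (ht : t + 1 ≤ A.length) :
    (PySem.List.pyRange ((t : Int) - 1) (-1) (-1)).foldl (fun (st : List Int × Int) j =>
        if PySem.List.pyGetD A j 0 ≠ PySem.List.pyGetD A (j + 1) 0 then
          (PySem.List.pySetD st.1 j (st.2 + 1), st.2 + 1)
        else
          (PySem.List.pySetD st.1 j 0, 0))
      ((List.range A.length).map (fun k => if t ≤ k then crA A k else 0), crA A t)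
    = ((List.range A.length).map (crA A), crA A 0) := by
  induction t with
  | zero =>
    rw [show ((0 : Nat) : Int) - 1 = -1 by norm_num, PySem.List.pyRange_neg_one_eq_nil le_rfl]
    simp only [List.foldl_nil]
    congr 1
  | succ t ih =>
    have ht' : t + 1 ≤ A.length := by omega
    have htlen : t + 1 < A.length := by omega
    rw [show ((t + 1 : Nat) : Int) - 1 = (t : Int) by push_cast; ring,
      PySem.List.pyRange_neg_one_cons (by omega : (-1 : Int) < (t : Int)), List.foldl_cons]
    have hgett : PySem.List.pyGetD A ((t : Int)) 0 = A.getD t 0 := PySem.List.pyGetD_natCast A t 0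
    have hgett1 : PySem.List.pyGetD A ((t : Int) + 1) 0 = A.getD (t + 1) 0 := by
      rw [show ((t : Int) + 1) = ((t + 1 : Nat) : Int) by push_cast; ring, PySem.List.pyGetD_natCast]
    have hcrt : crA A t = if A.getD t 0 ≠ A.getD (t + 1) 0 then crA A (t + 1) + 1 else 0 := by
      rw [crA, dif_pos htlen]
    have hset := set_map_ge A.length t (crA A) (by omega)
    by_cases hne : A.getD t 0 ≠ A.getD (t + 1) 0
    · rw [if_pos (by rw [hgett, hgett1]; exact hne)]
      have hval : crA A (t + 1) + 1 = crA A t := by rw [hcrt, if_pos hne]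
      rw [show ((t : Int)) = ((t : Nat) : Int) by norm_num, PySem.List.pySetD_natCast]
      rw [hval, hset]
      exact ih ht'
    · rw [if_neg (by rw [hgett, hgett1]; exact hne)]
      have hval : crA A t = 0 := by rw [hcrt, if_neg hne]
      rw [hval] at hset
      rw [show ((t : Int)) = ((t : Nat) : Int) by norm_num, PySem.List.pySetD_natCast, hset]
      have := ih ht'
      rw [hval] at this
      exact this

-- A's value, characterized as one filter (for B ≠ 0)
theorem A_char (A : List Int) (B : Int) (hB : B ≠ 0) :
    solve A B = (PySem.List.pyRange 0 (PySem.List.len A)).filter (pvP A B) := by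
  have hlen : PySem.List.len A = (A.length : Int) := rfl
  unfold solve
  rw [if_neg (by simp only [beq_iff_eq]; exact hB)]
  by_cases hn : A.length = 0
  · have hA : A = [] := List.length_eq_zero_iff.mp hn
    subst hA
    rfl
  · have hn1 : 1 ≤ A.length := by omega
    have hcr0 : crA A (A.length - 1) = 0 := crA_end A (A.length - 1) (Or.inl (by omega))
    simp only [hlen]
    rw [A_left_loop A A.length hn1 le_rfl]
    have hright : (PySem.List.pyRange ((A.length : Int) - 2) (-1) (-1)).foldl
        (fun (st : List Int × Int) j =>
          if PySem.List.pyGetD A j 0 ≠ PySem.List.pyGetD A (j + 1) 0 then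
            (PySem.List.pySetD st.1 j (st.2 + 1), st.2 + 1)
          else
            (PySem.List.pySetD st.1 j 0, 0)) (List.replicate A.length 0, 0)
        = ((List.range A.length).map (crA A), crA A 0) := by
      have h := A_right_loop A (A.length - 1) (by omega)
      rw [show ((A.length - 1 : Nat) : Int) - 1 = (A.length : Int) - 2 by omega] at h
      rw [← h]
      congr 1
      simp only [Prod.mk.injEq]
      constructor
      · symm
        apply map_range_eq_replicate
        intro k hk
        split
        · next hge =>
          have hkk : k = A.length - 1 := by omega
          rw [hkk]; exact hcr0
        · rfl
      · exact hcr0.symm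
    rw [hright]
    rw [PySem.List.foldl_append_ite
      (p := fun p : Int × Int => B ≤ PySem.List.pyGetD ((List.range A.length).map
          (fun k => if k < A.length then clA A k else 0)) p.1 0 ∧
        B ≤ PySem.List.pyGetD ((List.range A.length).map (crA A)) p.1 0)
      (f := fun p : Int × Int => p.1) (PySem.List.enumerate A) []]
    have hfm := @List.filter_map (Int × Int) Int (fun x : Int × Int => x.1)
      (fun i : Int => decide (B ≤ PySem.List.pyGetD ((List.range A.length).map
          (fun k => if k < A.length then clA A k else 0)) i 0 ∧
        B ≤ PySem.List.pyGetD ((List.range A.length).map (crA A)) i 0))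
      (PySem.List.enumerate A)
    rw [PySem.List.map_fst_enumerate] at hfm
    simp only [Function.comp_def] at hfm
    rw [List.nil_append, ← hfm, zero_add]
    refine List.filter_congr (fun i hi => ?_)
    rw [PySem.List.mem_pyRange_one] at hi
    obtain ⟨it, rfl⟩ : ∃ it : Nat, i = (it : Int) := ⟨i.toNat, by omega⟩
    have hit : it < A.length := by omega
    rw [PySem.List.pyGetD_natCast, PySem.List.pyGetD_natCast,
      PySem.List.getD_map_range _ _ _ _ hit, PySem.List.getD_map_range _ _ _ _ hit,
      if_pos hit]
    unfold pvP
    rw [Int.toNat_natCast]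

-- ===== B-side =====

-- filtering an interval condition out of a range
theorem filter_range_interval (l i a b : Int) (h1 : l ≤ a) (h2 : b ≤ i) :
    (PySem.List.pyRange l i).filter (fun k => decide (a ≤ k ∧ k < b)) = PySem.List.pyRange a b := by
  by_cases hab : b ≤ a
  · rw [PySem.List.pyRange_one_eq_nil hab]
    refine List.filter_eq_nil_iff.mpr (fun k hk => ?_)
    rw [PySem.List.mem_pyRange_one] at hk
    simp only [decide_eq_true_eq, not_and, not_lt]
    omega
  · rw [PySem.List.pyRange_one_append l a i h1 (by omega),
      PySem.List.pyRange_one_append a b i (by omega) h2,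
      List.filter_append, List.filter_append]
    have e1 : (PySem.List.pyRange l a).filter (fun k => decide (a ≤ k ∧ k < b)) = [] := by
      refine List.filter_eq_nil_iff.mpr (fun k hk => ?_)
      rw [PySem.List.mem_pyRange_one] at hk
      simp only [decide_eq_true_eq, not_and, not_lt]
      omega
    have e3 : (PySem.List.pyRange b i).filter (fun k => decide (a ≤ k ∧ k < b)) = [] := by
      refine List.filter_eq_nil_iff.mpr (fun k hk => ?_)
      rw [PySem.List.mem_pyRange_one] at hk
      simp only [decide_eq_true_eq, not_and, not_lt]
      omega
    have e2 : (PySem.List.pyRange a b).filter (fun k => decide (a ≤ k ∧ k < b))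
        = PySem.List.pyRange a b := by
      refine List.filter_eq_self.mpr (fun k hk => ?_)
      rw [PySem.List.mem_pyRange_one] at hk
      simp only [decide_eq_true_eq]
      omega
    rw [e1, e2, e3, List.append_nil]
    rfl

-- the qualifying indices of a completed run [l, r] form one contiguous range
theorem run_filter (A : List Int) (B : Int) (hB : 1 ≤ B) (r : Nat) (hr : r < A.length)
    (hcr : crA A r = 0) :
    (PySem.List.pyRange ((r : Int) - clA A r) ((r : Int) + 1)).filter (pvP A B)
      = PySem.List.pyRange ((r : Int) - clA A r + B) ((r : Int) + 1 - B) := by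
  have hcl_le := clA_le A r
  have hcl_nn := clA_nonneg A r
  have key : ∀ k ∈ PySem.List.pyRange ((r : Int) - clA A r) ((r : Int) + 1),
      pvP A B k = decide ((r : Int) - clA A r + B ≤ k ∧ k < (r : Int) + 1 - B) := by
    intro k hk
    rw [PySem.List.mem_pyRange_one] at hk
    obtain ⟨kt, rfl⟩ : ∃ kt : Nat, k = (kt : Int) := ⟨k.toNat, by omega⟩
    have hkt_le : kt ≤ r := by omega
    have hclk : clA A kt = (kt : Int) - ((r : Int) - clA A r) := by
      have hd : ((r - kt : Nat) : Int) ≤ clA A r := by push_cast; omega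
      have h3 := clA_back A r (r - kt) hd
      rw [show r - (r - kt) = kt by omega] at h3
      rw [h3]; push_cast; omega
    have hne : ∀ j, kt ≤ j → j < r → A.getD j 0 ≠ A.getD (j + 1) 0 := by
      intro j hj1 hj2
      have hd2 : ((r - (j + 1) : Nat) : Int) ≤ clA A r := by push_cast; omega
      have h3 := clA_back A r (r - (j + 1)) hd2
      rw [show r - (r - (j + 1)) = j + 1 by omega] at h3
      have hpos : 1 ≤ clA A (j + 1) := by rw [h3]; push_cast; omega
      exact fun hEq => (clA_succ_pos A j hpos).2 hEq.symm
    have hcrk : crA A kt = (r : Int) - (kt : Int) := by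
      rw [crA_chain A kt r hkt_le hr hne, hcr]; ring
    unfold pvP
    rw [Int.toNat_natCast, decide_eq_decide, hclk, hcrk]
    omega
  rw [List.filter_congr key,
    filter_range_interval _ _ _ _ (by omega) (by omega)]

theorem B_loop (A : List Int) (B : Int) (hB : 1 ≤ B) (m : Nat) (h1 : 1 ≤ m) (hm : m ≤ A.length) :
    (PySem.List.pyRange 1 (m : Int)).foldl (fun (st : List Int × Int) i =>
        if PySem.List.pyGetD A i 0 == PySem.List.pyGetD A (i - 1) 0 then
          (st.1 ++ PySem.List.pyRange (st.2 + B) (i - B), i)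
        else st) ([], 0)
    = ((PySem.List.pyRange 0 ((m : Int) - 1 - clA A (m - 1))).filter (pvP A B),
       (m : Int) - 1 - clA A (m - 1)) := by
  induction m, h1 using Nat.le_induction with
  | base =>
    rw [show ((1 : Nat) : Int) = 1 by norm_num, PySem.List.pyRange_one_eq_nil le_rfl]
    simp [clA, PySem.List.pyRange_one_eq_nil]
  | succ m hm1 ih =>
    have hmlen : m ≤ A.length := by omega
    have hcast : ((m + 1 : Nat) : Int) = (m : Int) + 1 := by push_cast; ring
    rw [hcast, PySem.List.pyRange_one_succ_right (by exact_mod_cast hm1), List.foldl_append,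
      ih hmlen, List.foldl_cons, List.foldl_nil]
    have hgetm : PySem.List.pyGetD A ((m : Int)) 0 = A.getD m 0 := PySem.List.pyGetD_natCast A m 0
    have hgetm1 : PySem.List.pyGetD A ((m : Int) - 1) 0 = A.getD (m - 1) 0 := by
      rw [show ((m : Int) - 1) = ((m - 1 : Nat) : Int) by omega, PySem.List.pyGetD_natCast]
    have hmm : m - 1 + 1 = m := by omega
    have hclm : clA A m = if A.getD m 0 ≠ A.getD (m - 1) 0 then clA A (m - 1) + 1 else 0 := by
      conv_lhs => rw [← hmm]
      simp only [clA]
      rw [hmm]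
    have hcl_le := clA_le A (m - 1)
    have hcl_nn := clA_nonneg A (m - 1)
    simp only [Nat.add_sub_cancel]
    by_cases heq : A.getD m 0 = A.getD (m - 1) 0
    · rw [if_pos (by rw [hgetm, hgetm1]; simp only [beq_iff_eq]; exact heq)]
      have hclm0 : clA A m = 0 := by rw [hclm, if_neg (not_not_intro heq)]
      have hcr0 : crA A (m - 1) = 0 := by
        refine crA_end A (m - 1) (Or.inr ?_)
        rw [hmm]; exact heq.symm
      have hrun := run_filter A B hB (m - 1) (by omega) hcr0
      rw [show ((m - 1 : Nat) : Int) = (m : Int) - 1 by omega,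
        show (m : Int) - 1 + 1 = (m : Int) by ring] at hrun
      have hR : (m : Int) + 1 - 1 - clA A m = (m : Int) := by rw [hclm0]; ring
      rw [hR]
      simp only [Prod.mk.injEq]
      refine ⟨?_, trivial⟩
      rw [PySem.List.pyRange_one_append 0 ((m : Int) - 1 - clA A (m - 1)) ((m : Int))
        (by omega) (by omega), List.filter_append, hrun]
    · rw [if_neg (by rw [hgetm, hgetm1]; simp only [beq_iff_eq]; exact heq)]
      have hclm1 : clA A m = clA A (m - 1) + 1 := by rw [hclm, if_pos heq]
      have hR : (m : Int) + 1 - 1 - clA A m = (m : Int) - 1 - clA A (m - 1) := by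
        rw [hclm1]; ring
      rw [hR]

theorem B_char (A : List Int) (B : Int) (hB : 1 ≤ B) :
    solve_alt A B = (PySem.List.pyRange 0 (PySem.List.len A)).filter (pvP A B) := by
  have hlen : PySem.List.len A = (A.length : Int) := rfl
  unfold solve_alt
  rw [hlen, if_neg (by omega : ¬ B ≤ 0)]
  by_cases hn : A.length = 0
  · rw [hn]
    rw [show ((0 : Nat) : Int) = 0 by norm_num,
      PySem.List.pyRange_one_eq_nil (by norm_num : (0 : Int) ≤ 1)]
    simp only [List.foldl_nil]
    rw [PySem.List.pyRange_one_eq_nil (by omega : (0 : Int) - B ≤ 0 + B),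
      PySem.List.pyRange_one_eq_nil (le_rfl : (0 : Int) ≤ 0)]
    simp
  · have hn1 : 1 ≤ A.length := by omega
    rw [B_loop A B hB A.length hn1 le_rfl]
    have hcl_le := clA_le A (A.length - 1)
    have hcl_nn := clA_nonneg A (A.length - 1)
    have hcr0 : crA A (A.length - 1) = 0 :=
      crA_end A (A.length - 1) (Or.inl (by omega))
    have hrun := run_filter A B hB (A.length - 1) (by omega) hcr0
    rw [show ((A.length - 1 : Nat) : Int) = (A.length : Int) - 1 by omega,
      show ((A.length : Int)) - 1 + 1 = (A.length : Int) by ring] at hrun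
    rw [PySem.List.pyRange_one_append 0 ((A.length : Int) - 1 - clA A (A.length - 1))
      ((A.length : Int)) (by omega) (by omega), List.filter_append, hrun]

-- ===== VERDICT (by name: the statement is the Claim_ definition above) =====
theorem solve_spec : Claim_equal_solve := by
  intro A B _
  unfold Spec_solve
  by_cases hB0 : B = 0
  · subst hB0
    simp [solve, solve_alt, PySem.List.map_fst_enumerate, PySem.List.len]
  · rw [A_char A B hB0]
    rcases (by omega : B ≤ 0 ∨ 1 ≤ B) with hB | hB
    · have hall : ∀ i ∈ PySem.List.pyRange 0 (PySem.List.len A), pvP A B i = true := by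
        intro i _
        have := clA_nonneg A i.toNat
        have := crA_nonneg A i.toNat
        simp [pvP]; constructor <;> omega
      rw [List.filter_eq_self.mpr hall]
      simp [solve_alt, hB]
    · rw [B_char A B hB]
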